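-- pv_equiv track=rewrite | github.com/databill86/ReGraph | regraph/category_op.py | compose_chain_homomorphisms
-- ===== SOURCE A (Python) =====
-- def compose_homomorphisms(d2, d1):
--     res = dict()
--     for key, value in d1.items():
--         if value in d2.keys():
--             res[key] = d2[value]
--     return res
--
-- def compose_chain_homomorphisms(chain):
--     homomorphism = chain[0]
--     for i in range(1, len(chain)):
--         homomorphism = compose_homomorphisms(
--             chain[i],
--             homomorphism
--         )
--     return homomorphism
-- ===== SOURCE B (Python) =====
-- def compose_chain_homomorphisms(chain):
--     if len(chain) == 1:
--         return chain[0]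
--     _MISSING = object()
--     result = {}
--     for key, value in chain[0].items():
--         v = value
--         for d in chain[1:]:
--             v = d.get(v, _MISSING)
--             if v is _MISSING:
--                 break
--         else:
--             result[key] = v
--     return result
-- ===== Notes on version B (the rewrite author's own statement) =====
-- stated objective: alternative
-- what changed: Replaces the pairwise fold that materialises an intermediate composed dict for every link with a single pass over chain[0] that walks each value through the remaining dicts via a sentinel .get, writing a key only if it survives the whole chain; it trades intermediate-dict allocation for per-key chain walks at similar overall cost.
import Mathlib
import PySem

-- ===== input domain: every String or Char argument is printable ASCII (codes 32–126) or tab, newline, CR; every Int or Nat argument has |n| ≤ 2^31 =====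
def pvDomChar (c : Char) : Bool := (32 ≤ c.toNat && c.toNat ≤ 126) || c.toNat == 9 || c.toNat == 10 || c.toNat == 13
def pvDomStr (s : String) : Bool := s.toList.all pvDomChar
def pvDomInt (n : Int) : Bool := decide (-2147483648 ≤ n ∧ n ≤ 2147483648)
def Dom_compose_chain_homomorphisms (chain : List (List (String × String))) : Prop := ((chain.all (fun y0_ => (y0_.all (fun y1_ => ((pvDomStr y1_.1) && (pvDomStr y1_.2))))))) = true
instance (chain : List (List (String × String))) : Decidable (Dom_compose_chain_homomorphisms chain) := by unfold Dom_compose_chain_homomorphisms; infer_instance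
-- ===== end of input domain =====

-- B replaces A's pairwise fold (one intermediate composed dict per link) with a single pass
-- over chain[0] walking each value through the remaining dicts (objective: alternative).

-- ===== PORT A =====
-- res = {}; for key, value in d1.items(): if value in d2.keys(): res[key] = d2[value]; return res
def compose_homomorphisms_port (d2 d1 : List (String × String)) : List (String × String) :=
  (d1.foldl (fun res kv =>
      if (PySem.Dict.mk d2).contains kv.2 then
        res.insert kv.1 ((PySem.Dict.mk d2).getD kv.2 "")
      else res)
    (PySem.Dict.empty : PySem.Dict String String)).items

def compose_chain_homomorphisms (chain : List (List (String × String))) : List (String × String) :=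
  match chain with
  | [] => []  -- Python raises IndexError on chain[0]; excluded by Pre_
  | h :: rest =>
    -- homomorphism = chain[0]; for i in range(1, len(chain)): homomorphism = compose_homomorphisms(chain[i], homomorphism)
    rest.foldl (fun hom d => compose_homomorphisms_port d hom) h

-- ===== PORT B =====
-- v = value; for d in chain[1:]: v = d.get(v, MISSING); if MISSING: break — the walk of one value
def walkChain : List (List (String × String)) → String → Option String
  | [], v => some v
  | d :: rest, v =>
    match (PySem.Dict.mk d).get? v with
    | some w => walkChain rest w
    | none => none

def compose_chain_homomorphisms_alt (chain : List (List (String × String))) : List (String × String) :=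
  match chain with
  | [] => []  -- chain[0].items() raises IndexError; excluded by Pre_
  | [c0] => c0  -- len(chain) == 1: return chain[0]
  | c0 :: rest =>
    (c0.foldl (fun result kv =>
        match walkChain rest kv.2 with
        | some w => result.insert kv.1 w
        | none => result)
      (PySem.Dict.empty : PySem.Dict String String)).items

-- ===== PRECONDITION & SPEC =====
-- Pre_ excludes the empty chain (A raises IndexError) and duplicate keys in the first
-- association list, which cannot arise from a Python dict argument (the corner is an
-- artefact of the list encoding of dicts, where first-match and overwrite readings clash).
def Pre_compose_chain_homomorphisms (chain : List (List (String × String))) : Prop :=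
  chain ≠ [] ∧ ((chain.headD []).map Prod.fst).Nodup
instance (chain : List (List (String × String))) : Decidable (Pre_compose_chain_homomorphisms chain) := by unfold Pre_compose_chain_homomorphisms; infer_instance

def pvWitness_compose_chain_homomorphisms : (List (List (String × String))) :=
  [[("a", "x"), ("b", "y")], [("x", "u")], [("u", "w")]]

def Spec_compose_chain_homomorphisms (chain : List (List (String × String))) (out : List (String × String)) : Prop := out = compose_chain_homomorphisms_alt chain
instance (chain : List (List (String × String))) (out : List (String × String)) : Decidable (Spec_compose_chain_homomorphisms chain out) := by unfold Spec_compose_chain_homomorphisms; infer_instance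

-- ===== CLAIM (what is proved, stated in full; the proofs are below) =====
def Claim_equal_compose_chain_homomorphisms : Prop := ∀ (chain : List (List (String × String))), Dom_compose_chain_homomorphisms chain → Pre_compose_chain_homomorphisms chain → Spec_compose_chain_homomorphisms chain (compose_chain_homomorphisms chain)

-- ===== LEMMAS AND PROOFS =====

-- the per-pair step of one link: look value up in d, keep the key on success
def pvStep (d : List (String × String)) (kv : String × String) : Option (String × String) :=
  ((PySem.Dict.mk d).get? kv.2).map (fun w => (kv.1, w))

-- a fold inserting fresh keys under an option test builds exactly a filterMap
lemma pv_build_items (f : String → Option String) :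
    ∀ (h : List (String × String)) (res : PySem.Dict String String),
      (res.keys ++ h.map Prod.fst).Nodup →
      (h.foldl (fun res kv =>
          match f kv.2 with
          | some w => res.insert kv.1 w
          | none => res) res).items
        = res.items ++ h.filterMap (fun kv => (f kv.2).map (fun w => (kv.1, w))) := by
  intro h
  induction h with
  | nil => intro res _; simp only [List.foldl_nil, List.filterMap_nil, List.append_nil]
  | cons kv t ih =>
    intro res hnd
    have hfresh : res.contains kv.1 = false := by
      by_contra hc
      have : kv.1 ∈ res.keys := by
        have := PySem.Dict.contains_iff_mem_keys (d := res) (k := kv.1)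
        simp only [Bool.not_eq_false] at hc
        exact this.mp hc
      have hdisj := (List.nodup_append.mp hnd).2.2
      exact hdisj kv.1 this kv.1 (by simp) rfl
    cases hf : f kv.2 with
    | none =>
      simp only [List.foldl_cons, hf, List.filterMap_cons, List.map_cons] at *
      exact ih res (by
        refine List.Nodup.sublist ?_ hnd
        exact List.Sublist.append_left (List.sublist_cons_self _ _) _)
    | some w =>
      simp only [List.foldl_cons, hf, List.filterMap_cons, List.map_cons] at *
      rw [ih (res.insert kv.1 w) ?_, PySem.Dict.items_insert_of_not_contains res w hfresh]
      · simp
      · rw [PySem.Dict.keys_insert_of_not_contains res w hfresh]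
        have : res.keys ++ kv.1 :: t.map Prod.fst = (res.keys ++ [kv.1]) ++ t.map Prod.fst := by
          simp
        rw [this] at hnd
        exact hnd

-- A's compose_homomorphisms is the same filterMap, when the argument's keys are distinct
lemma pv_compose_eq (d2 d1 : List (String × String)) (hnd : (d1.map Prod.fst).Nodup) :
    compose_homomorphisms_port d2 d1 = d1.filterMap (pvStep d2) := by
  unfold compose_homomorphisms_port
  have hbody : (fun (res : PySem.Dict String String) (kv : String × String) =>
      if (PySem.Dict.mk d2).contains kv.2 then
        res.insert kv.1 ((PySem.Dict.mk d2).getD kv.2 "")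
      else res)
    = (fun res kv =>
      match (PySem.Dict.mk d2).get? kv.2 with
      | some w => res.insert kv.1 w
      | none => res) := by
    funext res kv
    cases hg : (PySem.Dict.mk d2).get? kv.2 with
    | none =>
      simp [PySem.Dict.contains_eq_isSome_get?, hg]
    | some w =>
      simp [PySem.Dict.contains_eq_isSome_get?, hg, PySem.Dict.getD_eq_get?_getD]
  rw [hbody, pv_build_items (fun v => (PySem.Dict.mk d2).get? v) d1 PySem.Dict.empty (by simpa using hnd)]
  simp [pvStep, PySem.Dict.empty]

-- keys of the composed map form a sublist of the original keys
lemma pv_keys_sublist (d2 : List (String × String)) :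
    ∀ h : List (String × String),
      ((h.filterMap (pvStep d2)).map Prod.fst).Sublist (h.map Prod.fst) := by
  intro h
  induction h with
  | nil => simp
  | cons kv t ih =>
    cases hg : (PySem.Dict.mk d2).get? kv.2 with
    | none =>
      simp only [List.filterMap_cons, pvStep, hg, Option.map_none, List.map_cons]
      exact ih.cons _
    | some w =>
      simp only [List.filterMap_cons, pvStep, hg, Option.map_some, List.map_cons]
      exact ih.cons₂ _

-- composing one link and then walking the rest = walking the whole chain
lemma pv_fm_comp (d : List (String × String)) (rest : List (List (String × String))) :
    ∀ h : List (String × String),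
      (h.filterMap (pvStep d)).filterMap
          (fun kv => (walkChain rest kv.2).map (fun w => (kv.1, w)))
        = h.filterMap (fun kv => (walkChain (d :: rest) kv.2).map (fun w => (kv.1, w))) := by
  intro h
  rw [List.filterMap_filterMap]
  apply List.filterMap_congr
  intro kv _
  cases hg : (PySem.Dict.mk d).get? kv.2 with
  | none => simp [pvStep, walkChain, hg]
  | some w => simp [pvStep, walkChain, hg]

lemma pv_fm_id (h : List (String × String)) :
    h.filterMap (fun kv => (walkChain [] kv.2).map (fun w => (kv.1, w))) = h := by
  induction h with
  | nil => rfl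
  | cons kv t ih => simp [walkChain]

-- the heart: A's pairwise fold equals B's per-key walk, for any tail of the chain
lemma pv_main :
    ∀ (rest : List (List (String × String))) (h : List (String × String)),
      (h.map Prod.fst).Nodup →
      rest.foldl (fun hom d => compose_homomorphisms_port d hom) h
        = h.filterMap (fun kv => (walkChain rest kv.2).map (fun w => (kv.1, w))) := by
  intro rest
  induction rest with
  | nil => intro h _; simpa using (pv_fm_id h).symm
  | cons d rest' ih =>
    intro h hnd
    simp only [List.foldl_cons]
    rw [pv_compose_eq d h hnd,
        ih _ ((pv_keys_sublist d h).nodup hnd),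
        pv_fm_comp]

-- ===== VERDICT (by name: the statement is the Claim_ definition above) =====
theorem compose_chain_homomorphisms_spec : Claim_equal_compose_chain_homomorphisms := by
  intro chain _ hpre
  unfold Spec_compose_chain_homomorphisms
  obtain ⟨hne, hnd⟩ := hpre
  match chain with
  | [] => exact absurd rfl hne
  | [c0] =>
    simp [compose_chain_homomorphisms, compose_chain_homomorphisms_alt]
  | c0 :: d :: t =>
    simp only [List.headD] at hnd
    have hA : compose_chain_homomorphisms (c0 :: d :: t)
        = (d :: t).foldl (fun hom d => compose_homomorphisms_port d hom) c0 := rfl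
    have hB : compose_chain_homomorphisms_alt (c0 :: d :: t)
        = ((c0.foldl (fun result kv =>
              match walkChain (d :: t) kv.2 with
              | some w => result.insert kv.1 w
              | none => result)
            (PySem.Dict.empty : PySem.Dict String String)).items) := rfl
    rw [hA, hB, pv_main (d :: t) c0 hnd,
        pv_build_items (walkChain (d :: t)) c0 PySem.Dict.empty (by simpa using hnd)]
    simp [PySem.Dict.empty]
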